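-- pv_equiv track=rewrite | github.com/FM-Ahmed/Collection | PLD.py | validate_binary_inputs
-- ===== SOURCE A (Python) =====
-- def validate_binary_inputs(inputs):
--     if not isinstance(inputs, list):
--         raise ValueError('Please provide a (list) containing binary inputs.')
--     for inp in inputs:
--         if not isinstance(inp, str) or (not all(bit in '01' for bit in inp)) or (len(inp) < 1):
--             raise ValueError(f'Input must be a n-bit binary number.') # check if the input is valid
--
--     threshold = 5
--     max_len = max(len(binary) for binary in inputs)
--     if max_len < threshold:
--         padded_inputs = [binary.zfill(4) for binary in inputs]
--     else:
--         padded_inputs = [binary.zfill(max_len) for binary in inputs]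
--     return padded_inputs
-- ===== SOURCE B (Python) =====
-- def validate_binary_inputs(inputs):
--     if not isinstance(inputs, list):
--         raise ValueError('Please provide a (list) containing binary inputs.')
--     # online single pass: emit each string padded to the widest length seen so far
--     # (at least 4); when a longer string arrives, re-pad everything emitted so far.
--     width = 4
--     padded = []
--     for b in inputs:
--         if not isinstance(b, str) or not b or set(b) - {'0', '1'}:
--             raise ValueError('Input must be a n-bit binary number.')
--         if len(b) > width:
--             grow = '0' * (len(b) - width)
--             padded = [grow + p for p in padded]
--             width = len(b)
--         padded.append(b.rjust(width, '0'))
--     return padded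
-- ===== Notes on version B (the rewrite author's own statement) =====
-- stated objective: alternative
-- what changed: B replaces A's three staged passes (validate, max(), two pad branches) by a single online pass that emits each string padded to the widest length seen so far (at least 4) and re-pads the already-emitted outputs whenever a longer string arrives; Pre_ excludes exactly the inputs where A raises ValueError (empty list, empty strings, non-'0'/'1' characters).
import Mathlib
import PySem

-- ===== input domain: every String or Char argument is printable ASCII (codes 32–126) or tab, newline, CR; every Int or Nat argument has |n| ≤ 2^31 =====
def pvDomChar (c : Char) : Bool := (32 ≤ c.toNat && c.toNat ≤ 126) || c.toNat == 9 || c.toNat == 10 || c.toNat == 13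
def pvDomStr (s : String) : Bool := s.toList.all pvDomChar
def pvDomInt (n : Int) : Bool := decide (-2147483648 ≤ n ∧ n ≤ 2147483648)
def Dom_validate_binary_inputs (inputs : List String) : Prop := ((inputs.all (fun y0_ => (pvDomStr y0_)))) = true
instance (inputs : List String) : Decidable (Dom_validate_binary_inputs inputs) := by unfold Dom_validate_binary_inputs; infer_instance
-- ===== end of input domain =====

-- B replaces A's staged validate / max() / pad passes by a single online pass that re-pads
-- the already-emitted outputs whenever a longer string arrives.


-- ===== PORT A =====
-- 'bit in "01"' on a single character is ported as bit = '0' ∨ bit = '1' (exact for chars).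
def validate_binary_inputs (inputs : List String) : List String :=
  -- the per-element validation loop; a failed check is a ValueError (excluded by Pre_)
  if inputs.all (fun inp =>
      inp.toList.all (fun bit => bit == '0' || bit == '1') && decide (1 ≤ inp.toList.length)) then
    match PySem.List.max? (inputs.map (fun binary => PySem.Str.len binary)) (fun x => x) with
    | none => []          -- max() of an empty sequence raises ValueError (excluded by Pre_)
    | some max_len =>
      if max_len < 5 then inputs.map (fun binary => PySem.Str.zfill binary 4)
      else inputs.map (fun binary => PySem.Str.zfill binary max_len)
  else []                 -- ValueError (excluded by Pre_)

-- ===== PORT B =====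
-- the online loop: width = widest length seen so far (at least 4), padded = outputs so far;
-- a raise is 'none'. 'set(b) - {"0","1"}' nonempty iff some char of b is outside {'0','1'};
-- b.rjust(width,'0') on chars is replicate (width - len).toNat '0' ++ chars (exact, no PySem primitive).
def padLoop : List String → Int → List (List Char) → Option (List (List Char))
  | [], _, padded => some padded
  | b :: rest, width, padded =>
    let cs := b.toList
    if cs.isEmpty || cs.any (fun c => !(c == '0' || c == '1')) then none
    else if width < (cs.length : Int) then
      let grow := List.replicate ((cs.length : Int) - width).toNat '0'
      padLoop rest (cs.length : Int)
        ((padded.map (fun p => grow ++ p)) ++ [List.replicate (((cs.length : Int)) - (cs.length : Int)).toNat '0' ++ cs])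
    else
      padLoop rest width (padded ++ [List.replicate (width - (cs.length : Int)).toNat '0' ++ cs])

def validate_binary_inputs_alt (inputs : List String) : List String :=
  match padLoop inputs 4 [] with
  | none => []            -- ValueError (excluded by Pre_)
  | some padded => padded.map String.ofList

-- ===== PRECONDITION & SPEC =====
-- Pre_ excludes exactly the inputs on which Python A raises ValueError: the empty list
-- (max() of an empty sequence) and lists containing an empty string or a non-'0'/'1' character.
def Pre_validate_binary_inputs (inputs : List String) : Prop :=
  inputs ≠ [] ∧
    (inputs.all (fun s => !s.toList.isEmpty && s.toList.all (fun c => c == '0' || c == '1'))) = true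
instance (inputs : List String) : Decidable (Pre_validate_binary_inputs inputs) := by
  unfold Pre_validate_binary_inputs; infer_instance
def pvWitness_validate_binary_inputs : List String := ["101", "1"]

def Spec_validate_binary_inputs (inputs : List String) (out : List String) : Prop := out = validate_binary_inputs_alt inputs
instance (inputs : List String) (out : List String) : Decidable (Spec_validate_binary_inputs inputs out) := by unfold Spec_validate_binary_inputs; infer_instance

-- ===== CLAIM (what is proved, stated in full; the proofs are below) =====
def Claim_equal_validate_binary_inputs : Prop := ∀ (inputs : List String), Dom_validate_binary_inputs inputs → Pre_validate_binary_inputs inputs → Spec_validate_binary_inputs inputs (validate_binary_inputs inputs)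
-- ===== LEMMAS AND PROOFS =====

-- zfill on a sign-free nonempty string is plain left padding with '0'
theorem zfill_eq_pad (cs : List Char) (w : Int) (hne : cs ≠ [])
    (hb : ∀ c ∈ cs, c = '0' ∨ c = '1') :
    PySem.Chars.zfill cs w = List.replicate (w - cs.length).toNat '0' ++ cs := by
  unfold PySem.Chars.zfill
  split
  · have : (w - (cs.length : Int)).toNat = 0 := by omega
    simp [this]
  · match cs, hne with
    | c :: rest, _ =>
      have hc := hb c (by simp)
      have hcs : ¬ (c = '+' ∨ c = '-') := by
        rcases hc with h | h <;> simp [h]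
      simp only [if_neg hcs]
      congr 1
      congr 1
      omega

-- invariant of B's online loop: on valid input, padLoop pads everything (the already-emitted
-- accumulator, whose elements all have the current width, and the remaining strings) to the
-- final width W = foldl max over the remaining lengths starting from the current width.
theorem le_fold_width (l : List String) (w : Int) :
    w ≤ l.foldl (fun m b => max m ((b.toList.length : Int))) w := by
  have h := (PySem.List.le_foldl_max (l.map (fun b : String => ((b.toList.length : Int)))) w).1
  rwa [List.foldl_map] at h

theorem padLoop_eq (l : List String) (w : Int) (acc : List (List Char))
    (hval : ∀ s ∈ l, s.toList ≠ [] ∧ ∀ c ∈ s.toList, c = '0' ∨ c = '1')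
    (hacc : ∀ p ∈ acc, (p.length : Int) = w) :
    padLoop l w acc = some
      ((acc ++ l.map String.toList).map
        (fun cs => List.replicate ((l.foldl (fun m b => max m ((b.toList.length : Int))) w) - (cs.length : Int)).toNat '0' ++ cs)) := by
  induction l generalizing w acc with
  | nil =>
    simp only [padLoop, List.map_nil, List.append_nil, List.foldl_nil]
    congr 1
    have h : ∀ p ∈ acc, (fun cs => List.replicate (w - (List.length cs : Int)).toNat '0' ++ cs) p = id p := by
      intro p hp
      have := hacc p hp
      have h0 : (w - (p.length : Int)).toNat = 0 := by omega
      simp [h0]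
    exact ((List.map_congr_left h).trans (List.map_id _)).symm
  | cons b rest ih =>
    obtain ⟨hne, hbits⟩ := hval b (by simp)
    have hvalr : ∀ s ∈ rest, s.toList ≠ [] ∧ ∀ c ∈ s.toList, c = '0' ∨ c = '1' :=
      fun s hs => hval s (List.mem_cons_of_mem _ hs)
    have hguard : (b.toList.isEmpty || b.toList.any (fun c => !(c == '0' || c == '1'))) = false := by
      simp only [Bool.or_eq_false_iff, List.isEmpty_eq_false_iff, List.any_eq_false]
      exact ⟨hne, fun c hc => by rcases hbits c hc with h | h <;> simp [h]⟩
    simp only [padLoop, hguard, Bool.false_eq_true, if_false]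
    by_cases hgrow : w < ((b.toList.length : Int))
    · have hinit : max w ((b.toList.length : Int)) = ((b.toList.length : Int)) := max_eq_right hgrow.le
      rw [if_pos hgrow]
      have hacc' : ∀ p ∈ ((acc.map (fun p => List.replicate (((b.toList.length : Int)) - w).toNat '0' ++ p)) ++ [List.replicate ((((b.toList.length : Int))) - ((b.toList.length : Int))).toNat '0' ++ b.toList]),
          (p.length : Int) = ((b.toList.length : Int)) := by
        intro p hp
        rcases List.mem_append.mp hp with hp | hp
        · obtain ⟨q, hq, rfl⟩ := List.mem_map.mp hp
          have := hacc q hq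
          simp only [List.length_append, List.length_replicate]
          omega
        · simp only [List.mem_singleton] at hp
          subst hp
          simp only [List.length_append, List.length_replicate]
          omega
      rw [ih _ _ hvalr hacc']
      simp only [List.foldl_cons, hinit, sub_self, Int.toNat_zero, List.replicate_zero,
        List.nil_append]
      set W := rest.foldl (fun m b => max m ((b.toList.length : Int))) ((b.toList.length : Int)) with hWdef
      have hWlb : ((b.toList.length : Int)) ≤ W := le_fold_width rest _
      have hmid : List.map (fun cs => List.replicate (W - ((cs.length : Int))).toNat '0' ++ cs)
            (acc.map (fun p => List.replicate (((b.toList.length : Int)) - w).toNat '0' ++ p))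
          = List.map (fun cs => List.replicate (W - ((cs.length : Int))).toNat '0' ++ cs) acc := by
        rw [List.map_map]
        apply List.map_congr_left
        intro p hp
        have hpl := hacc p hp
        simp only [Function.comp_apply]
        rw [← List.append_assoc, ← List.replicate_add]
        congr 2
        simp only [List.length_append, List.length_replicate]
        omega
      simp only [List.map_append, List.map_cons, List.append_assoc, List.singleton_append]
      rw [hmid]
    · have hinit : max w ((b.toList.length : Int)) = w := max_eq_left (not_lt.mp hgrow)
      rw [if_neg hgrow]
      have hacc' : ∀ p ∈ (acc ++ [List.replicate (w - ((b.toList.length : Int))).toNat '0' ++ b.toList]),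
          (p.length : Int) = w := by
        intro p hp
        rcases List.mem_append.mp hp with hp | hp
        · exact hacc p hp
        · simp only [List.mem_singleton] at hp
          subst hp
          simp only [List.length_append, List.length_replicate]
          omega
      rw [ih _ _ hvalr hacc']
      simp only [List.foldl_cons, hinit]
      set W := rest.foldl (fun m b => max m ((b.toList.length : Int))) w with hWdef
      have hWw : w ≤ W := le_fold_width rest _
      have hone : List.replicate (W - (((List.replicate (w - ((b.toList.length : Int))).toNat '0' ++ b.toList).length : Int))).toNat '0'
              ++ (List.replicate (w - ((b.toList.length : Int))).toNat '0' ++ b.toList)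
          = List.replicate (W - ((b.toList.length : Int))).toNat '0' ++ b.toList := by
        rw [← List.append_assoc, ← List.replicate_add]
        congr 2
        simp only [List.length_append, List.length_replicate]
        omega
      simp only [List.map_append, List.map_cons, List.append_assoc, List.singleton_append]
      rw [hone]

theorem validate_binary_inputs_spec : Claim_equal_validate_binary_inputs := by
  intro inputs _ hpre
  obtain ⟨hne, hb⟩ := hpre
  have hall : ∀ s ∈ inputs, s.toList ≠ [] ∧ ∀ c ∈ s.toList, c = '0' ∨ c = '1' := by
    intro s hs
    have h := List.all_eq_true.mp hb s hs
    simp only [Bool.and_eq_true, Bool.not_eq_eq_eq_not, Bool.not_true, List.all_eq_true, beq_iff_eq, Bool.or_eq_true] at h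
    exact ⟨by simpa [List.isEmpty_iff] using h.1, h.2⟩
  unfold Spec_validate_binary_inputs validate_binary_inputs validate_binary_inputs_alt
  have hokA : inputs.all (fun inp =>
      inp.toList.all (fun bit => bit == '0' || bit == '1') && decide (1 ≤ inp.toList.length)) = true := by
    rw [List.all_eq_true]
    intro inp hin
    obtain ⟨h1, h2⟩ := hall inp hin
    simp only [Bool.and_eq_true, List.all_eq_true, decide_eq_true_eq]
    constructor
    · intro c hc
      rcases h2 c hc with h | h <;> simp [h]
    · cases h : inp.toList with
      | nil => exact absurd h h1
      | cons a l => simp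
  rw [if_pos hokA]
  rw [padLoop_eq inputs 4 [] hall (by simp)]
  simp only [List.nil_append]
  match inputs, hne with
  | x :: t, _ =>
    have hmax : PySem.List.max? ((x :: t).map (fun binary => PySem.Str.len binary)) (fun x => x)
        = some ((t.map (fun binary => PySem.Str.len binary)).foldl max (PySem.Str.len x)) := by
      rw [List.map_cons, PySem.List.max?_id_cons]
    rw [hmax]
    dsimp only
    set M := (t.map (fun binary => PySem.Str.len binary)).foldl max (PySem.Str.len x) with hM
    have hMx : PySem.Str.len x ≤ M := by
      rw [hM]
      exact (PySem.List.le_foldl_max (t.map (fun binary => PySem.Str.len binary)) (PySem.Str.len x)).1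
    have hx1 : (1 : Int) ≤ PySem.Str.len x := by
      obtain ⟨h1, _⟩ := hall x (by simp)
      simp only [PySem.Str.len]
      cases h : x.toList with
      | nil => exact absurd h h1
      | cons a l => simp
    have hW : (x :: t).foldl (fun m b => max m ((b.toList.length : Int))) 4 = max 4 M := by
      have hswap : ∀ (l : List String) (a c : Int),
          l.foldl (fun m b => max m ((b.toList.length : Int))) (max a c)
            = max a (l.foldl (fun m b => max m ((b.toList.length : Int))) c) := by
        intro l
        induction l with
        | nil => intro a c; simp
        | cons y ys ihy =>
          intro a c
          simp only [List.foldl_cons, max_assoc, ihy]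
      have ht : t.foldl (fun m b => max m ((b.toList.length : Int))) (PySem.Str.len x)
          = (t.map (fun binary => PySem.Str.len binary)).foldl max (PySem.Str.len x) := by
        rw [List.foldl_map]
        rfl
      calc (x :: t).foldl (fun m b => max m ((b.toList.length : Int))) 4
          = t.foldl (fun m b => max m ((b.toList.length : Int))) (max 4 (PySem.Str.len x)) := by
            simp only [List.foldl_cons]; rfl
        _ = max 4 (t.foldl (fun m b => max m ((b.toList.length : Int))) (PySem.Str.len x)) := hswap t 4 _
        _ = max 4 M := by rw [ht, hM]
    rw [hW]
    by_cases h5 : M < 5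
    · have h4 : max 4 M = 4 := max_eq_left (by omega)
      rw [if_pos h5, h4, List.map_map, List.map_map]
      apply List.map_congr_left
      intro s hs
      obtain ⟨h1, h2⟩ := hall s hs
      simp only [Function.comp_apply, PySem.Str.zfill]
      rw [zfill_eq_pad s.toList 4 h1 h2]
    · have h4 : max 4 M = M := max_eq_right (by omega)
      rw [if_neg h5, h4, List.map_map, List.map_map]
      apply List.map_congr_left
      intro s hs
      obtain ⟨h1, h2⟩ := hall s hs
      simp only [Function.comp_apply, PySem.Str.zfill]
      rw [zfill_eq_pad s.toList M h1 h2]
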